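-- pv_equiv track=rewrite | github.com/hiteshgulati/Cricket_Data | yaml_to_csv.py | adjust_stack_for_pop
-- ===== SOURCE A (Python) =====
-- def adjust_stack_for_pop(stack, header):
--     if len(stack) >= 1:
--         new_data = stack.pop()
--         if new_data[1] == len(new_data[0])-1:
--             (surplus_stack, header) = adjust_stack_for_pop(stack, (header.rsplit(">",1))[0])
--         else:
--             stack.append(new_data)
--     return (stack, header)
-- ===== SOURCE B (Python) =====
-- def adjust_stack_for_pop(stack, header):
--     i = len(stack)
--     while i > 0 and stack[i - 1][1] == len(stack[i - 1][0]) - 1: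
--         header = header.rsplit(">", 1)[0]
--         i -= 1
--     del stack[i:]
--     return (stack, header)
-- ===== Notes on version B (the rewrite author's own statement) =====
-- stated objective: simpler
-- what changed: Replaced A's recursion (pop a frame, recurse on the shrunken stack, re-append on the stop case) by one index scan that counts the trailing completed frames, then truncates the stack once and trims the header once per counted frame.
import Mathlib
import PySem

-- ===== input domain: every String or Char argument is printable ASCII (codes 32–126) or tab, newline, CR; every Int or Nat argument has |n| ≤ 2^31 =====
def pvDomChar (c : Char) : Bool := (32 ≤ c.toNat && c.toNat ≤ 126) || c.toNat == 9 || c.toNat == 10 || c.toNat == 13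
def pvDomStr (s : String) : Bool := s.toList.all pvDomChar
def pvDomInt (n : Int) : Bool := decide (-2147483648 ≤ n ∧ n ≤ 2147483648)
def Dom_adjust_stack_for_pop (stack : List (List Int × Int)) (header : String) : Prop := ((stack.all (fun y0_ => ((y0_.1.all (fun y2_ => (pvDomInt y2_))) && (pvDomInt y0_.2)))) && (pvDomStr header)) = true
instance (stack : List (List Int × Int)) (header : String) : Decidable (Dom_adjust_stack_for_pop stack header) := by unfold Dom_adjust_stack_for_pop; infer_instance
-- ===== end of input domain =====

-- B replaces A's recursion (pop, recurse, re-append) by a single index scan that counts the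
-- completed trailing frames, then truncates the stack and trims the header once per frame
-- (simpler; return value proved equal — both A and B mutate `stack` in place in Python, to the
-- same final contents).


-- hand port of `header.rsplit(">", 1)[0]` (PySem has no rsplit): the text before the last '>'
-- if one exists, else the whole string; exact for every string.
def pvRsplitHead (header : String) : String :=
  let r := header.toList.reverse
  if '>' ∈ r then String.ofList ((r.dropWhile (· ≠ '>')).tail.reverse) else header

-- ===== PORT A =====
-- pop() → getLast?/dropLast; append(new_data) → ++ [new_data]; recursion as in A.
def adjust_stack_for_pop (stack : List (List Int × Int)) (header : String) : (List (List Int × Int)) × String :=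
  match hpop : stack.getLast? with
  | some new_data =>
      if new_data.2 = (new_data.1.length : Int) - 1 then
        adjust_stack_for_pop stack.dropLast (pvRsplitHead header)
      else (stack.dropLast ++ [new_data], header)
  | none => (stack, header)
termination_by stack.length
decreasing_by
  have hne : stack ≠ [] := by intro e; subst e; simp at hpop
  have := List.length_pos_iff.mpr hne
  simp [List.length_dropLast]; omega

-- ===== PORT B =====
-- the `while i > 0 and stack[i-1][1] == len(stack[i-1][0]) - 1:` loop of Source B;
-- the `none` branch is a totality guard only (the loop always has i ≤ len(stack)).
def pvAltLoop (stack : List (List Int × Int)) (i : Nat) (header : String) : Nat × String :=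
  if i > 0 then
    match stack[i - 1]? with
    | some nd =>
        if nd.2 = (nd.1.length : Int) - 1 then pvAltLoop stack (i - 1) (pvRsplitHead header)
        else (i, header)
    | none => (i, header)
  else (i, header)
termination_by i

-- `del stack[i:]` → take i
def adjust_stack_for_pop_alt (stack : List (List Int × Int)) (header : String) : (List (List Int × Int)) × String :=
  let r := pvAltLoop stack stack.length header
  (stack.take r.1, r.2)

-- ===== PRECONDITION & SPEC =====
def Spec_adjust_stack_for_pop (stack : List (List Int × Int)) (header : String) (out : (List (List Int × Int)) × String) : Prop := out = adjust_stack_for_pop_alt stack header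
instance (stack : List (List Int × Int)) (header : String) (out : (List (List Int × Int)) × String) : Decidable (Spec_adjust_stack_for_pop stack header out) := by unfold Spec_adjust_stack_for_pop; infer_instance

-- ===== CLAIM (what is proved, stated in full; the proofs are below) =====
def Claim_equal_adjust_stack_for_pop : Prop := ∀ (stack : List (List Int × Int)) (header : String), Dom_adjust_stack_for_pop stack header → Spec_adjust_stack_for_pop stack header (adjust_stack_for_pop stack header)

-- ===== LEMMAS AND PROOFS =====

lemma pvAltLoop_fst_le (s : List (List Int × Int)) :
    ∀ (i : Nat) (h : String), (pvAltLoop s i h).1 ≤ i := by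
  intro i
  induction i with
  | zero => intro h; simp [pvAltLoop]
  | succ n ih =>
      intro h
      rw [pvAltLoop]
      simp only [Nat.succ_sub_one, Nat.zero_lt_succ, if_pos]
      cases s[n]? with
      | none => simp
      | some nd =>
        by_cases hc : nd.2 = (nd.1.length : Int) - 1
        · simp only [hc, if_pos]
          exact le_trans (ih _) (Nat.le_succ n)
        · simp [hc]

lemma pvAltLoop_append (s : List (List Int × Int)) (nd : List Int × Int) :
    ∀ (i : Nat), i ≤ s.length → ∀ (h : String),
      pvAltLoop (s ++ [nd]) i h = pvAltLoop s i h := by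
  intro i
  induction i with
  | zero => intro _ h; simp [pvAltLoop]
  | succ n ih =>
      intro hle h
      rw [pvAltLoop]
      conv_rhs => rw [pvAltLoop]
      simp only [Nat.succ_sub_one]
      rw [if_pos (Nat.succ_pos n), if_pos (Nat.succ_pos n)]
      rw [List.getElem?_append_left (by omega)]
      cases s[n]? with
      | none => rfl
      | some x =>
        by_cases hc : x.2 = (x.1.length : Int) - 1
        · simp only [hc, if_pos]
          exact ih (by omega) _
        · simp [hc]

lemma adjust_eq_alt : ∀ (s : List (List Int × Int)) (h : String),
    adjust_stack_for_pop s h = adjust_stack_for_pop_alt s h := by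
  intro s
  induction s using List.reverseRecOn with
  | nil => intro h; simp [adjust_stack_for_pop, adjust_stack_for_pop_alt, pvAltLoop]
  | append_singleton s nd ih =>
      intro h
      rw [adjust_stack_for_pop]
      split
      next new_data h1 =>
        rw [List.getLast?_concat] at h1
        obtain rfl : new_data = nd := by injection h1 with h2; exact h2.symm
        rw [List.dropLast_concat]
        unfold adjust_stack_for_pop_alt
        conv_rhs => rw [pvAltLoop]
        simp only [List.length_append, List.length_cons, List.length_nil, 
          Nat.succ_sub_one, List.getElem?_concat_length]
        rw [if_pos (Nat.succ_pos s.length)]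
        by_cases hc : new_data.2 = (new_data.1.length : Int) - 1
        · simp only [hc, if_pos]
          rw [pvAltLoop_append s new_data s.length (le_refl _)]
          rw [ih (pvRsplitHead h)]
          unfold adjust_stack_for_pop_alt
          have hle := pvAltLoop_fst_le s s.length (pvRsplitHead h)
          rw [List.take_append_of_le_length hle]
        · simp only [hc, ite_false]
          rw [List.take_of_length_le (by simp)]
      next h1 =>
        rw [List.getLast?_concat] at h1
        exact absurd h1 (by simp)

-- ===== VERDICT (by name: the statement is the Claim_ definition above) =====
theorem adjust_stack_for_pop_spec : Claim_equal_adjust_stack_for_pop := by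
  intro stack header _
  unfold Spec_adjust_stack_for_pop
  exact adjust_eq_alt stack header
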